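-- pv_equiv track=rewrite | github.com/obtic-sorbonne/ocr_correction | lib/send_to_hugging_face_corpus_tokenized_filtered.py | align_texts_with_at
-- ===== SOURCE A (Python) =====
-- def align_texts_with_at(ocr_text, gt_text):
--     """
--     Aligns two texts at the character level by inserting `@` symbols where necessary
--     to make their lengths match while preserving alignment.
--
--     Args:
--         ocr_text (str): The OCR text.
--         gt_text (str): The ground truth text.
--
--     Returns:
--         tuple: The aligned OCR text and aligned ground truth text with `@` inserted.
--     """
--     aligned_ocr = []
--     aligned_gt = []
--     ocr_len, gt_len = len(ocr_text), len(gt_text)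
--
--     i, j = 0, 0  # Pointers for OCR and GT text
--
--     while i < ocr_len or j < gt_len:
--         ocr_char = ocr_text[i] if i < ocr_len else None
--         gt_char = gt_text[j] if j < gt_len else None
--
--         if ocr_char == gt_char:  # Characters match
--             aligned_ocr.append(ocr_char)
--             aligned_gt.append(gt_char)
--             i += 1
--             j += 1
--         elif ocr_char is None:  # OCR text is shorter
--             aligned_ocr.append('@')
--             aligned_gt.append(gt_char)
--             j += 1
--         elif gt_char is None:  # GT text is shorter
--             aligned_ocr.append(ocr_char)
--             aligned_gt.append('@')
--             i += 1
--         else:  # Characters differ, add `@` to align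
--             aligned_ocr.append(ocr_char)
--             aligned_gt.append(gt_char)
--             i += 1
--             j += 1
--
--     return ''.join(aligned_ocr), ''.join(aligned_gt)
-- ===== SOURCE B (Python) =====
-- def align_texts_with_at(ocr_text, gt_text):
--     n = max(len(ocr_text), len(gt_text))
--     return ocr_text.ljust(n, '@'), gt_text.ljust(n, '@')
-- ===== Notes on version B (the rewrite author's own statement) =====
-- stated objective: simpler
-- what changed: Replaced the two-pointer per-character loop (whose match/differ branches both advance both pointers in lockstep) by right-padding each string with '@' to the maximum length via str.ljust.
import Mathlib
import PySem

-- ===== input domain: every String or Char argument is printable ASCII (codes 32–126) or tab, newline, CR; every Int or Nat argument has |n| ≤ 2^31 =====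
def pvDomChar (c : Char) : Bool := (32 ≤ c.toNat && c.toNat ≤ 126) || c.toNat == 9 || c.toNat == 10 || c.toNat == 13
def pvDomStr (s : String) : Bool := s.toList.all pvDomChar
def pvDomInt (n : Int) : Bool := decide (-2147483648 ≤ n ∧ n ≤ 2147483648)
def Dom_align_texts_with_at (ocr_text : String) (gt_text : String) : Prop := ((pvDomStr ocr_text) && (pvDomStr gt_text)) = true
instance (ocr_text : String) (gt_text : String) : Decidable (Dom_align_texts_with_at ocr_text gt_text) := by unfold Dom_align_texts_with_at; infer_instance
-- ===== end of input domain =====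

-- B replaces A's two-pointer loop by right-padding each string with '@' to the maximum length (simpler).

-- ===== PORT A =====
-- the while loop over pointers i, j, as structural recursion on the remaining suffixes
def alignAtAux : List Char → List Char → List Char × List Char
  | [], [] => ([], [])
  | [], g :: gs =>                      -- ocr_char is None: OCR text is shorter
      let r := alignAtAux [] gs
      ('@' :: r.1, g :: r.2)
  | o :: os, [] =>                      -- gt_char is None: GT text is shorter
      let r := alignAtAux os []
      (o :: r.1, '@' :: r.2)
  | o :: os, g :: gs =>
      let r := alignAtAux os gs
      if o == g then (o :: r.1, g :: r.2)   -- characters match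
      else (o :: r.1, g :: r.2)             -- characters differ

def align_texts_with_at (ocr_text : String) (gt_text : String) : String × String :=
  let r := alignAtAux ocr_text.toList gt_text.toList
  (String.mk r.1, String.mk r.2)

-- ===== PORT B =====
def align_texts_with_at_alt (ocr_text : String) (gt_text : String) : String × String :=
  let n := max ocr_text.toList.length gt_text.toList.length
  (String.mk (ocr_text.toList ++ List.replicate (n - ocr_text.toList.length) '@'),
   String.mk (gt_text.toList ++ List.replicate (n - gt_text.toList.length) '@'))

-- ===== PRECONDITION & SPEC =====
def Spec_align_texts_with_at (ocr_text : String) (gt_text : String) (out : String × String) : Prop := out = align_texts_with_at_alt ocr_text gt_text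
instance (ocr_text : String) (gt_text : String) (out : String × String) : Decidable (Spec_align_texts_with_at ocr_text gt_text out) := by unfold Spec_align_texts_with_at; infer_instance

-- ===== CLAIM (what is proved, stated in full; the proofs are below) =====
def Claim_equal_align_texts_with_at : Prop := ∀ (ocr_text : String) (gt_text : String), Dom_align_texts_with_at ocr_text gt_text → Spec_align_texts_with_at ocr_text gt_text (align_texts_with_at ocr_text gt_text)

-- ===== LEMMAS AND PROOFS =====
theorem alignAtAux_eq (os gs : List Char) :
    alignAtAux os gs =
      (os ++ List.replicate (max os.length gs.length - os.length) '@',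
       gs ++ List.replicate (max os.length gs.length - gs.length) '@') := by
  induction os generalizing gs with
  | nil =>
      induction gs with
      | nil => simp [alignAtAux]
      | cons g gs ih => simp [alignAtAux, ih, List.replicate_succ]
  | cons o os ih =>
      cases gs with
      | nil =>
          have h := ih []
          simp [alignAtAux, h, List.replicate_succ]
      | cons g gs =>
          have h := ih gs
          simp [alignAtAux, h, Nat.succ_max_succ]

-- ===== VERDICT (by name: the statement is the Claim_ definition above) =====
theorem align_texts_with_at_spec : Claim_equal_align_texts_with_at := by
  intro ocr gt _
  unfold Spec_align_texts_with_at align_texts_with_at align_texts_with_at_alt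
  simp [alignAtAux_eq]
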